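-- pv_equiv track=rewrite | github.com/ad-astra-per-ardua/Solving-Algorithm | acmicpc/#11443 짝수번째 피보나치 수의 합/짝수번째 피보나치 수의 합.py | f
-- ===== SOURCE A (Python) =====
-- def mult(a,b):
--     A = [[0,0],[0,0]]
--     for i in range(2):
--         for j in range(2):
--             for k in range(2):
--                 A[i][j] += a[i][k] * b[k][j] % 1000000007
--     return A
--
-- def f(x, n):
--     if n == 1:
--         return x
--     else :
--         matrix = f(x,n//2)
--         if n % 2 == 0:
--             return mult(matrix, matrix)
--         else:
--             return mult(mult(matrix,matrix), x)
-- ===== SOURCE B (Python) =====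
-- def mult(a,b):
--     A = [[0,0],[0,0]]
--     for i in range(2):
--         for j in range(2):
--             for k in range(2):
--                 A[i][j] += a[i][k] * b[k][j] % 1000000007
--     return A
--
-- def f(x, n):
--     # MSB-first iterative binary exponentiation; the leading bit gives result = x,
--     # each remaining bit squares and, if set, multiplies by x (same grouping as A's recursion).
--     result = x
--     for bit in bin(n)[3:]:
--         result = mult(result, result)
--         if bit == '1':
--             result = mult(result, x)
--     return result
-- ===== Notes on version B (the rewrite author's own statement) =====
-- stated objective: alternative
-- what changed: Replaced the recursive halving exponentiation with an MSB-first iterative binary-exponentiation loop over bin(n)[3:], keeping mult unchanged; same multiplication grouping, no recursion.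
import Mathlib
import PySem

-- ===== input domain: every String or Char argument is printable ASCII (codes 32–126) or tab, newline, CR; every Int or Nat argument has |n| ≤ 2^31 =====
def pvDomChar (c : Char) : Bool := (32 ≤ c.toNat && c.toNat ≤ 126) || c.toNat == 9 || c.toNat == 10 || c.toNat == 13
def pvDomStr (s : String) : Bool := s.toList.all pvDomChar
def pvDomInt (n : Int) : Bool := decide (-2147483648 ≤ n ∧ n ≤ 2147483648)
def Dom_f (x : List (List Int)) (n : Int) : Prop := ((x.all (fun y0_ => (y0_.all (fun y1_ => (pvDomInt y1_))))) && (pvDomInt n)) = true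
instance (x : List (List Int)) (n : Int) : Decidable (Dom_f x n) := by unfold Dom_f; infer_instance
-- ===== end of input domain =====

-- B replaces A's recursive halving exponentiation by an MSB-first iterative
-- binary-exponentiation loop with the same multiplication grouping (objective: alternative).


-- ===== PORT A =====
-- mult: triple range(2) loop mutating A = [[0,0],[0,0]]. Indices are the literals 0 and 1
-- (nonnegative, so .toNat is exact); Python's a[i][k]/b[k][j] raise on short matrices, which
-- Pre_f excludes, so getD with default 0 is only evaluated in range on admitted inputs.
def mult (a b : List (List Int)) : List (List Int) :=
  (PySem.List.pyRange 0 2 1).foldl (fun A i =>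
    (PySem.List.pyRange 0 2 1).foldl (fun A j =>
      (PySem.List.pyRange 0 2 1).foldl (fun A k =>
        A.modify i.toNat (fun row => row.modify j.toNat (fun v =>
          v + (a.getD i.toNat []).getD k.toNat 0 *
              (b.getD k.toNat []).getD j.toNat 0 % 1000000007)))
        A) A)
    [[0, 0], [0, 0]]

def f (x : List (List Int)) (n : Int) : List (List Int) :=
  if n = 1 then x
  else if n ≤ 1 then x  -- totality guard only: Python recurses forever for n ≤ 0 (outside Pre_f)
  else
    let matrix := f x (PySem.Int.floordiv n 2)
    if PySem.Int.mod n 2 = 0 then mult matrix matrix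
    else mult (mult matrix matrix) x
termination_by n.toNat
decreasing_by
  rw [PySem.Int.floordiv_eq_ediv_of_pos (by omega)]
  omega

-- ===== PORT B =====
-- bin(n)[3:] as a list of bits, MSB first: the binary digits of n below the leading one.
def bitsTail (m : Nat) : List Bool :=
  if m ≤ 1 then [] else bitsTail (m / 2) ++ [m % 2 == 1]

def f_alt (x : List (List Int)) (n : Int) : List (List Int) :=
  (bitsTail n.toNat).foldl (fun result bit =>
    let result := mult result result
    if bit then mult result x else result) x

-- ===== PRECONDITION & SPEC =====
-- Pre_f: Python A raises (RecursionError) for n ≤ 0, and raises IndexError for n ≥ 2 when x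
-- lacks two rows of length ≥ 2 (mult indexes x at [0..1][0..1]); only raising inputs are excluded.
def Pre_f (x : List (List Int)) (n : Int) : Prop :=
  1 ≤ n ∧ (n = 1 ∨ (2 ≤ x.length ∧ 2 ≤ (x.getD 0 []).length ∧ 2 ≤ (x.getD 1 []).length))
instance (x : List (List Int)) (n : Int) : Decidable (Pre_f x n) := by unfold Pre_f; infer_instance
def pvWitness_f : List (List Int) × Int := ([[1, 1], [1, 0]], 3)

def Spec_f (x : List (List Int)) (n : Int) (out : List (List Int)) : Prop := out = f_alt x n
instance (x : List (List Int)) (n : Int) (out : List (List Int)) : Decidable (Spec_f x n out) := by unfold Spec_f; infer_instance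

-- ===== CLAIM (what is proved, stated in full; the proofs are below) =====
def Claim_equal_f : Prop := ∀ (x : List (List Int)) (n : Int), Dom_f x n → Pre_f x n → Spec_f x n (f x n)

-- ===== LEMMAS AND PROOFS =====

-- The recursion of A is exactly the MSB-first fold of B, for every positive Nat exponent.
lemma f_eq_fold (m : Nat) : 1 ≤ m → ∀ x : List (List Int),
    f x (m : Int) = (bitsTail m).foldl (fun result bit =>
      let result := mult result result
      if bit then mult result x else result) x := by
  induction m using Nat.strong_induction_on with
  | _ m ih =>
    intro h1 x
    by_cases hm : m = 1
    · subst hm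
      rw [f, bitsTail]
      simp
    · have h2 : 2 ≤ m := by omega
      rw [f, bitsTail]
      have hne : ¬((m : Int) = 1) := by exact_mod_cast (by omega : ¬ m = 1)
      have hle : ¬((m : Int) ≤ 1) := by exact_mod_cast (by omega : ¬ m ≤ 1)
      rw [if_neg hne, if_neg hle, if_neg (by omega : ¬ m ≤ 1)]
      rw [List.foldl_append]
      have hfd : PySem.Int.floordiv (m : Int) 2 = ((m / 2 : Nat) : Int) := by
        exact_mod_cast PySem.Int.floordiv_natCast m 2
      have hmd : PySem.Int.mod (m : Int) 2 = ((m % 2 : Nat) : Int) := by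
        exact_mod_cast PySem.Int.mod_natCast m 2
      rw [hfd, hmd]
      rw [← ih (m / 2) (by omega) (by omega) x]
      by_cases hpar : m % 2 = 0
      · have : ((m % 2 : Nat) : Int) = 0 := by exact_mod_cast hpar
        rw [if_pos this]
        simp [hpar, List.foldl]
      · have h1' : m % 2 = 1 := by omega
        have : ¬ ((m % 2 : Nat) : Int) = 0 := by exact_mod_cast hpar
        rw [if_neg this]
        simp [h1', List.foldl]

-- ===== VERDICT (by name: the statement is the Claim_ definition above) =====
theorem f_spec : Claim_equal_f := by
  intro x n _ hpre
  unfold Spec_f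
  have h1 : 1 ≤ n := hpre.1
  have hn : n = ((n.toNat : Nat) : Int) := by omega
  rw [hn]
  unfold f_alt
  rw [Int.toNat_natCast]
  exact f_eq_fold n.toNat (by omega) x
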